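-- pv_equiv track=rewrite | github.com/miliar/Code_Jam_Webscraper | Solutions_in_python/Problem_59/FileFixIt.py | FileFixIt
-- ===== SOURCE A (Python) =====
-- def FileFixIt(N,M,paths):
-- 	pc = []
-- 	t,i = 0,1
-- 	for p in paths:
-- 		x = ''
-- 		for y in p.split('/')[1:]:
-- 			x = "%s/%s" % (x,y)
-- 			if x not in pc:
-- 				pc.append(x)
-- 				if i > N:
-- 					t += 1
-- 		i += 1
-- 	return t
-- ===== SOURCE B (Python) =====
-- def FileFixIt(N, M, paths):
--     def prefixes(p):
--         x = ''
--         res = []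
--         for y in p.split('/')[1:]:
--             x = '%s/%s' % (x, y)
--             res.append(x)
--         return res
--     k = max(N, 0)
--     existing = {q for p in paths[:k] for q in prefixes(p)}
--     new = {q for p in paths[k:] for q in prefixes(p)}
--     return len(new - existing)
-- ===== Notes on version B (the rewrite author's own statement) =====
-- stated objective: simpler
-- what changed: Replaces A's single interleaved pass (a growing membership list pc plus a counter incremented on paths with index > N) with two bulk set builds - the directory prefixes of paths[:N] and of paths[N:] - and one set difference whose size is the answer.
import Mathlib
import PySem

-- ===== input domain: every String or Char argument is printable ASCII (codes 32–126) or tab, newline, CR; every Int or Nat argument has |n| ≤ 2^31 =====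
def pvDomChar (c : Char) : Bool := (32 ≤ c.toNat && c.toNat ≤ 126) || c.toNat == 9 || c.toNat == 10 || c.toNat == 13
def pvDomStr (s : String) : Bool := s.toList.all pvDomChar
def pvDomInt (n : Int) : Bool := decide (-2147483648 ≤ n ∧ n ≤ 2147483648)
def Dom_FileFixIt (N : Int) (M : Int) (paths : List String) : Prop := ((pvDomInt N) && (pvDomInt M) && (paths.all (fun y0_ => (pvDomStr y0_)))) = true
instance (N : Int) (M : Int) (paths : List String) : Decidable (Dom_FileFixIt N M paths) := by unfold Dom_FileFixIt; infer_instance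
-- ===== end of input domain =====

-- B replaces A's single interleaved membership-list-and-counter pass with two bulk prefix-set
-- builds (paths[:N] and paths[N:]) and one set difference, which is simpler; return value only.

-- ===== PORT A =====
-- p.split('/') never raises for the non-empty separator '/', so `.getD []` is exact here.
def FileFixIt (N : Int) (M : Int) (paths : List String) : Int :=
  let fin := paths.foldl (fun (st : List String × Int × Int) p =>
    let inner := (((PySem.Str.split? p "/").getD []).drop 1).foldl
      (fun (s : String × List String × Int) y =>
        let x := s.1 ++ "/" ++ y
        if x ∈ s.2.1 then (x, s.2.1, s.2.2)
        else (x, s.2.1 ++ [x], if st.2.2 > N then s.2.2 + 1 else s.2.2))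
      ("", st.1, st.2.1)
    (inner.2.1, inner.2.2, st.2.2 + 1)) ([], 0, 1)
  fin.2.1

-- ===== PORT B =====
-- helper `prefixes` of Source B
def pvPrefixes (p : String) : List String :=
  ((((PySem.Str.split? p "/").getD []).drop 1).foldl
    (fun (s : String × List String) y =>
      let x := s.1 ++ "/" ++ y
      (x, s.2 ++ [x])) ("", [])).2

def FileFixIt_alt (N : Int) (M : Int) (paths : List String) : Int :=
  let k := max N 0
  let existing : PySem.Set String :=
    PySem.Set.ofList ((PySem.List.slice paths none (some k)).flatMap pvPrefixes)
  let newPrefixes : PySem.Set String :=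
    PySem.Set.ofList ((PySem.List.slice paths (some k) none).flatMap pvPrefixes)
  PySem.Set.len (PySem.Set.diff newPrefixes existing)

-- ===== PRECONDITION & SPEC =====
def Spec_FileFixIt (N : Int) (M : Int) (paths : List String) (out : Int) : Prop := out = FileFixIt_alt N M paths
instance (N : Int) (M : Int) (paths : List String) (out : Int) : Decidable (Spec_FileFixIt N M paths out) := by unfold Spec_FileFixIt; infer_instance

-- ===== CLAIM (what is proved, stated in full; the proofs are below) =====
def Claim_equal_FileFixIt : Prop := ∀ (N : Int) (M : Int) (paths : List String), Dom_FileFixIt N M paths → Spec_FileFixIt N M paths (FileFixIt N M paths)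

-- ===== LEMMAS AND PROOFS =====

-- the '/'-separated pieces of a path after the first one, as A and B both read them
def pvParts (p : String) : List String := ((PySem.Str.split? p "/").getD []).drop 1

-- the accumulated prefix strings produced from seed x0 over pieces l
def pvPrefsFrom (x0 : String) : List String → List String
  | [] => []
  | y :: l => (x0 ++ "/" ++ y) :: pvPrefsFrom (x0 ++ "/" ++ y) l

-- one dedup-or-count step over a single prefix string (c = whether this path is counted)
def pvStep (c : Bool) (s : List String × Int) (q : String) : List String × Int :=
  if q ∈ s.1 then s else (s.1 ++ [q], if c then s.2 + 1 else s.2)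

lemma pvPrefixes_fold (l : List String) (x0 : String) (acc : List String) :
    (l.foldl (fun (s : String × List String) y =>
      let x := s.1 ++ "/" ++ y
      (x, s.2 ++ [x])) (x0, acc)).2 = acc ++ pvPrefsFrom x0 l := by
  induction l generalizing x0 acc with
  | nil => simp [pvPrefsFrom]
  | cons y l ih => simp [pvPrefsFrom, ih]

lemma pvPrefixes_eq (p : String) : pvPrefixes p = pvPrefsFrom "" (pvParts p) := by
  simpa using pvPrefixes_fold (pvParts p) "" []

lemma pvInner_fold (N : Int) (l : List String) (x0 : String) (pc : List String) (t i : Int) :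
    (l.foldl (fun (s : String × List String × Int) y =>
        let x := s.1 ++ "/" ++ y
        if x ∈ s.2.1 then (x, s.2.1, s.2.2)
        else (x, s.2.1 ++ [x], if i > N then s.2.2 + 1 else s.2.2)) (x0, pc, t)).2
      = (pvPrefsFrom x0 l).foldl (pvStep (decide (i > N))) (pc, t) := by
  induction l generalizing x0 pc t with
  | nil => simp [pvPrefsFrom]
  | cons y l ih =>
      have hstep : (fun (s : String × List String × Int) y =>
          let x := s.1 ++ "/" ++ y
          if x ∈ s.2.1 then (x, s.2.1, s.2.2)
          else (x, s.2.1 ++ [x], if i > N then s.2.2 + 1 else s.2.2)) (x0, pc, t) y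
          = (x0 ++ "/" ++ y, pvStep (decide (i > N)) (pc, t) (x0 ++ "/" ++ y)) := by
        by_cases h : (x0 ++ "/" ++ y) ∈ pc <;> by_cases hiN : i > N <;>
          simp [pvStep, h, hiN]
      rw [pvPrefsFrom, List.foldl_cons, List.foldl_cons]
      rw [show (let x := (x0, pc, t).1 ++ "/" ++ y;
          if x ∈ (x0, pc, t).2.1 then (x, (x0, pc, t).2.1, (x0, pc, t).2.2)
          else (x, (x0, pc, t).2.1 ++ [x],
            if i > N then (x0, pc, t).2.2 + 1 else (x0, pc, t).2.2))
          = ((x0 ++ "/" ++ y : String), pvStep (decide (i > N)) (pc, t) (x0 ++ "/" ++ y))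
          from hstep]
      exact ih _ _ _

lemma pvFold_false (E : List String) (pc : List String) (t : Int) :
    E.foldl (pvStep false) (pc, t) = (PySem.Set.update pc E, t) := by
  induction E generalizing pc t with
  | nil => simp [PySem.Set.update]
  | cons q E ih =>
      have hadd : (pvStep false (pc, t) q) = (PySem.Set.add pc q, t) := by
        unfold pvStep PySem.Set.add
        by_cases h : q ∈ pc <;> simp [h]
      rw [List.foldl_cons, hadd, ih]
      rfl

lemma pvFold_true (L : List String) (pc : List String) (t : Int) :
    L.foldl (pvStep true) (pc, t)
      = (PySem.Set.update pc L,
         t + ((PySem.Set.update pc L).length : Int) - (pc.length : Int)) := by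
  induction L generalizing pc t with
  | nil => simp [PySem.Set.update]
  | cons q L ih =>
      have hupd : PySem.Set.update pc (q :: L) = PySem.Set.update (PySem.Set.add pc q) L := rfl
      by_cases h : q ∈ pc
      · have hadd : PySem.Set.add pc q = pc := by
          unfold PySem.Set.add; simp [h]
        rw [List.foldl_cons]
        have hst : pvStep true (pc, t) q = (pc, t) := by simp [pvStep, h]
        rw [hst, ih, hupd, hadd]
      · have hadd : PySem.Set.add pc q = pc ++ [q] := by
          unfold PySem.Set.add; simp [h]
        rw [List.foldl_cons]
        have hst : pvStep true (pc, t) q = (pc ++ [q], t + 1) := by simp [pvStep, h]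
        rw [hst, ih, hupd, hadd]
        refine Prod.ext rfl ?_
        simp only [List.length_append, List.length_singleton]
        push_cast
        ring


lemma pvOuter_true (N : Int) (l : List String) (pc : List String) (t i : Int) (hi : i > N) :
    l.foldl (fun (st : List String × Int × Int) p =>
      let inner := (((PySem.Str.split? p "/").getD []).drop 1).foldl
        (fun (s : String × List String × Int) y =>
          let x := s.1 ++ "/" ++ y
          if x ∈ s.2.1 then (x, s.2.1, s.2.2)
          else (x, s.2.1 ++ [x], if st.2.2 > N then s.2.2 + 1 else s.2.2))
        ("", st.1, st.2.1)
      (inner.2.1, inner.2.2, st.2.2 + 1)) (pc, t, i)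
    = (((l.flatMap (fun p => pvPrefsFrom "" (pvParts p))).foldl (pvStep true) (pc, t)).1,
       ((l.flatMap (fun p => pvPrefsFrom "" (pvParts p))).foldl (pvStep true) (pc, t)).2,
       i + l.length) := by
  induction l generalizing pc t i with
  | nil => simp
  | cons p l ih =>
      have hinner := pvInner_fold N (pvParts p) "" pc t i
      rw [show decide (i > N) = true by simp [hi]] at hinner
      rw [List.foldl_cons]
      show List.foldl _
          ((List.foldl (fun (s : String × List String × Int) y =>
              let x := s.1 ++ "/" ++ y
              if x ∈ s.2.1 then (x, s.2.1, s.2.2)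
              else (x, s.2.1 ++ [x], if i > N then s.2.2 + 1 else s.2.2))
            ("", pc, t) (pvParts p)).2.1,
           (List.foldl (fun (s : String × List String × Int) y =>
              let x := s.1 ++ "/" ++ y
              if x ∈ s.2.1 then (x, s.2.1, s.2.2)
              else (x, s.2.1 ++ [x], if i > N then s.2.2 + 1 else s.2.2))
            ("", pc, t) (pvParts p)).2.2,
           i + 1) l = _
      rw [hinner]
      rw [ih _ _ _ (by omega)]
      simp only [List.flatMap_cons, List.foldl_append, Prod.mk.eta]
      refine Prod.ext rfl (Prod.ext rfl ?_)
      simp; omega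

-- A's outer loop over paths all of whose indices are at most N (recording phase)
lemma pvOuter_false (N : Int) (l : List String) (pc : List String) (t i : Int)
    (hi : i + l.length ≤ N + 1) :
    l.foldl (fun (st : List String × Int × Int) p =>
      let inner := (((PySem.Str.split? p "/").getD []).drop 1).foldl
        (fun (s : String × List String × Int) y =>
          let x := s.1 ++ "/" ++ y
          if x ∈ s.2.1 then (x, s.2.1, s.2.2)
          else (x, s.2.1 ++ [x], if st.2.2 > N then s.2.2 + 1 else s.2.2))
        ("", st.1, st.2.1)
      (inner.2.1, inner.2.2, st.2.2 + 1)) (pc, t, i)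
    = (PySem.Set.update pc (l.flatMap (fun p => pvPrefsFrom "" (pvParts p))), t, i + l.length) := by
  induction l generalizing pc t i with
  | nil => simp [PySem.Set.update]
  | cons p l ih =>
      have hinner := pvInner_fold N (pvParts p) "" pc t i
      have hdec : decide (i > N) = false := by
        simp only [List.length_cons] at hi
        simp; omega
      rw [hdec, pvFold_false] at hinner
      rw [List.foldl_cons]
      show List.foldl _
          ((List.foldl (fun (s : String × List String × Int) y =>
              let x := s.1 ++ "/" ++ y
              if x ∈ s.2.1 then (x, s.2.1, s.2.2)
              else (x, s.2.1 ++ [x], if i > N then s.2.2 + 1 else s.2.2))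
            ("", pc, t) (pvParts p)).2.1,
           (List.foldl (fun (s : String × List String × Int) y =>
              let x := s.1 ++ "/" ++ y
              if x ∈ s.2.1 then (x, s.2.1, s.2.2)
              else (x, s.2.1 ++ [x], if i > N then s.2.2 + 1 else s.2.2))
            ("", pc, t) (pvParts p)).2.2,
           i + 1) l = _
      rw [hinner]
      rw [ih _ _ _ (by simp at hi ⊢; omega)]
      refine Prod.ext ?_ (Prod.ext rfl ?_)
      · simp [PySem.Set.update, List.foldl_append, List.flatMap_cons]
      · simp; omega

-- cardinality: growing a duplicate-free list by L adds exactly |set(L) - s| elements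
lemma pvCard (s : List String) (L : List String) (hs : s.Nodup) :
    ((PySem.Set.update s L).length : Int)
      = (s.length : Int) + ((PySem.Set.diff (PySem.Set.ofList L) s).length : Int) := by
  have h1 : (PySem.Set.update s L).toFinset = s.toFinset ∪ L.toFinset := by
    ext x; simp [PySem.Set.mem_update]
  have h2 : (PySem.Set.diff (PySem.Set.ofList L) s).toFinset = L.toFinset \ s.toFinset := by
    ext x; simp [PySem.Set.mem_diff, PySem.Set.mem_ofList]
  have n1 : (PySem.Set.update s L).Nodup := PySem.Set.nodup_update s L hs
  have n2 : (PySem.Set.diff (PySem.Set.ofList L) s).Nodup :=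
    PySem.Set.nodup_diff _ _ (PySem.Set.nodup_ofList L)
  have c1 := List.toFinset_card_of_nodup n1
  have c2 := List.toFinset_card_of_nodup n2
  have c3 := List.toFinset_card_of_nodup hs
  have hcard := Finset.card_sdiff_add_card (L.toFinset) (s.toFinset)
  rw [h1] at c1; rw [h2] at c2
  rw [Finset.union_comm] at hcard
  omega

-- ===== VERDICT (by name: the statement is the Claim_ definition above) =====
theorem FileFixIt_spec : Claim_equal_FileFixIt := by
  intro N M paths _
  unfold Spec_FileFixIt FileFixIt FileFixIt_alt
  simp only []
  have hk : (0 : Int) ≤ max N 0 := le_max_right _ _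
  rw [PySem.List.slice_to _ hk, PySem.List.slice_from _ hk]
  set k : Nat := (max N 0).toNat with hkdef
  have hsplit : paths = paths.take k ++ paths.drop k := (List.take_append_drop k paths).symm
  set E := ((paths.take k).flatMap (fun p => pvPrefsFrom "" (pvParts p))) with hE
  set L := ((paths.drop k).flatMap (fun p => pvPrefsFrom "" (pvParts p))) with hL
  have hBpref : ∀ l : List String, l.flatMap pvPrefixes = l.flatMap (fun p => pvPrefsFrom "" (pvParts p)) := by
    intro l; exact List.flatMap_congr (fun p _ => pvPrefixes_eq p)
  -- evaluate A's fold in two phases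
  have hphase1 : (paths.take k).foldl (fun (st : List String × Int × Int) p =>
      let inner := (((PySem.Str.split? p "/").getD []).drop 1).foldl
        (fun (s : String × List String × Int) y =>
          let x := s.1 ++ "/" ++ y
          if x ∈ s.2.1 then (x, s.2.1, s.2.2)
          else (x, s.2.1 ++ [x], if st.2.2 > N then s.2.2 + 1 else s.2.2))
        ("", st.1, st.2.1)
      (inner.2.1, inner.2.2, st.2.2 + 1)) ([], 0, 1)
      = (PySem.Set.ofList E, (0 : Int), 1 + ((paths.take k).length : Int)) := by
    rcases le_or_gt N 0 with hN | hN
    · have hk0 : k = 0 := by omega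
      simp [hk0, PySem.Set.ofList, PySem.Set.empty, hE]
    · have hlen : ((paths.take k).length : Int) ≤ N := by
        have : (paths.take k).length ≤ k := by simp
        have : ((paths.take k).length : Int) ≤ (k : Int) := by exact_mod_cast this
        have hkN : (k : Int) = N := by omega
        omega
      have := pvOuter_false N (paths.take k) [] 0 1 (by omega)
      rw [this]
      rfl
  have hphase2 := pvOuter_true N (paths.drop k) (PySem.Set.ofList E) 0 (1 + ((paths.take k).length : Int))
  conv_lhs => rw [hsplit]
  rw [List.foldl_append, hphase1]
  rcases List.eq_nil_or_concat (paths.drop k) with hnil | hcon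
  · -- no counted paths: both sides are 0
    rw [hnil]
    simp only [List.foldl_nil]
    simp [PySem.Set.ofList, PySem.Set.diff, PySem.Set.empty, PySem.Set.len_eq]
  · have hi : 1 + ((paths.take k).length : Int) > N := by
      rcases le_or_gt N 0 with hN | hN
      · omega
      · by_cases hlen : k ≤ paths.length
        · have : (paths.take k).length = k := by simp [hlen]
          rw [this]; omega
        · -- k > paths.length: drop k is empty, contradiction with nonempty case is not needed;
          -- here take k = paths and drop k = []
          have hdrop : paths.drop k = [] := List.drop_eq_nil_of_le (by omega)
          rcases hcon with ⟨l, b, hb⟩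
          rw [hdrop] at hb
          exact absurd hb (by simp)
    rw [hphase2 hi]
    simp only [← hL]
    rw [pvFold_true]
    rw [hBpref, hBpref, ← hE, ← hL, PySem.Set.len_eq]
    have := pvCard (PySem.Set.ofList E) L (PySem.Set.nodup_ofList E)
    omega
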